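-- pv_equiv track=rewrite | github.com/BCaven/tennis-shot-tree | src/parse-raw-data.py | parse_individual_point
-- ===== SOURCE A (Python) =====
-- def parse_individual_point(raw_point: str, possible_shots="fbrsvzopuylmhijktq") -> list:
--     """
--         Parses point sentences into a list of individual shots
--
--         RULES:
--             Look at the "Instructions" section of MatchChart.xlsm
--     """
--     # going to build shots backwards, start at the end and go to the beginning
--     individual_chars = [c for c in raw_point]
--     shots = []
--     while len(individual_chars) > 0:
--         current_shot = ""
--         while individual_chars[-1] not in possible_shots:
--             current_shot = individual_chars.pop() + current_shot
--             if not individual_chars: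
--                 break
--         if individual_chars:
--             if individual_chars[-1] in possible_shots:
--                 current_shot = individual_chars.pop() + current_shot
--         shots.insert(0, current_shot)
--     return shots
-- ===== SOURCE B (Python) =====
-- def parse_individual_point(raw_point: str, possible_shots="fbrsvzopuylmhijktq") -> list:
--     """Single forward pass: start a new token at each shot character."""
--     shots = []
--     current = ""
--     for c in raw_point:
--         if c in possible_shots:
--             if current:
--                 shots.append(current)
--             current = c
--         else:
--             current += c
--     if current:
--         shots.append(current)
--     return shots
-- ===== Notes on version B (the rewrite author's own statement) =====
-- stated objective: faster
-- what changed: Replaces A's backward destructive popping with nested while-loops and shots.insert(0, ...) front-insertion by a single forward scan with a string accumulator that flushes a token at each shot character.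
import Mathlib
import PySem

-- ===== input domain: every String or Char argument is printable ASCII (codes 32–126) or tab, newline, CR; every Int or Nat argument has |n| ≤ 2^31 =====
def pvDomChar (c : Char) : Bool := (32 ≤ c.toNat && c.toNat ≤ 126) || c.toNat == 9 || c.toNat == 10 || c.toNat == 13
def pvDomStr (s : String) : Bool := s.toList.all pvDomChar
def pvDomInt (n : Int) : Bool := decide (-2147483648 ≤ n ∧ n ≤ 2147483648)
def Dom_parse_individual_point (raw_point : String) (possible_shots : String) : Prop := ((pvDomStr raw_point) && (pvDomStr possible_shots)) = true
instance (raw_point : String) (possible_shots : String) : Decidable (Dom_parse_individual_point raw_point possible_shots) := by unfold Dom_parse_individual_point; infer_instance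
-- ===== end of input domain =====

-- B replaces A's backward destructive popping with a single forward pass and a string accumulator (simpler, one linear scan).

-- ===== PORT A =====
-- A keeps `individual_chars` and pops from its END; the port keeps that list REVERSED,
-- so `pop()` = taking the head.  `current_shot = pop + current_shot` = consing the popped char.
-- Inner `while individual_chars[-1] not in possible_shots: pop; if empty: break`:
def pvInnerA (ps : String) : List Char → List Char → List Char × List Char
  | [], cur => ([], cur)                           -- the `if not individual_chars: break`
  | c :: rest, cur =>
    if ps.toList.contains c then (c :: rest, cur)  -- last char IS a shot: loop condition fails
    else pvInnerA ps rest (c :: cur)               -- pop it onto the front of current_shot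

-- facts the outer loop's termination needs (cited by name in decreasing_by)
theorem pvInnerA_len (ps : String) : ∀ (rcs cur : List Char), (pvInnerA ps rcs cur).1.length ≤ rcs.length := by
  intro rcs
  induction rcs with
  | nil => intro cur; simp [pvInnerA]
  | cons c rest ih =>
    intro cur
    simp only [pvInnerA]
    split
    · simp
    · exact Nat.le_succ_of_le (ih _)

theorem pvInnerA_head (ps : String) : ∀ (rcs cur d : _) (rest' : List Char),
    (pvInnerA ps rcs cur).1 = d :: rest' → ps.toList.contains d = true := by
  intro rcs
  induction rcs with
  | nil => intro cur d rest' h; simp [pvInnerA] at h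
  | cons c rest ih =>
    intro cur d rest' h
    simp only [pvInnerA] at h
    split at h
    next hc => simp at h; rw [← h.1]; exact hc
    next => exact ih _ _ _ h

-- outer `while len(individual_chars) > 0`: run the inner loop, then pop the shot char
-- (if any), and `shots.insert(0, current_shot)`.
def pvOuterA (ps : String) : List Char → List String → List String
  | [], shots => shots
  | c :: rest, shots =>
    match h : pvInnerA ps (c :: rest) [] with
    | ([], cur) => pvOuterA ps [] (String.mk cur :: shots)
    | (d :: rest', cur) =>
      if hd : ps.toList.contains d then pvOuterA ps rest' (String.mk (d :: cur) :: shots)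
      else pvOuterA ps (d :: rest') (String.mk cur :: shots)  -- unreachable (inner stops only at a shot char)
  termination_by rcs _ => rcs.length
  decreasing_by
  · simp
  · have := pvInnerA_len ps (c :: rest) []
    rw [h] at this
    simp at this ⊢
    omega
  · exact absurd (pvInnerA_head ps (c :: rest) [] d rest' (by rw [h])) hd

def parse_individual_point (raw_point : String) (possible_shots : String) : List String :=
  pvOuterA possible_shots raw_point.toList.reverse []

-- ===== PORT B =====
-- forward scan: `current` accumulator, flush it (if nonempty) at each shot char and at the end
def pvAltGo (ps : String) : List Char → List Char → List String → List String
  | [], cur, acc => if cur = [] then acc else acc ++ [String.mk cur]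
  | c :: rest, cur, acc =>
    if ps.toList.contains c then
      pvAltGo ps rest [c] (if cur = [] then acc else acc ++ [String.mk cur])
    else
      pvAltGo ps rest (cur ++ [c]) acc

def parse_individual_point_alt (raw_point : String) (possible_shots : String) : List String :=
  pvAltGo possible_shots raw_point.toList [] []

-- ===== PRECONDITION & SPEC =====
def Spec_parse_individual_point (raw_point : String) (possible_shots : String) (out : List String) : Prop := out = parse_individual_point_alt raw_point possible_shots
instance (raw_point : String) (possible_shots : String) (out : List String) : Decidable (Spec_parse_individual_point raw_point possible_shots out) := by unfold Spec_parse_individual_point; infer_instance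

-- ===== CLAIM (what is proved, stated in full; the proofs are below) =====
def Claim_equal_parse_individual_point : Prop := ∀ (raw_point : String) (possible_shots : String), Dom_parse_individual_point raw_point possible_shots → Spec_parse_individual_point raw_point possible_shots (parse_individual_point raw_point possible_shots)

-- ===== LEMMAS AND PROOFS =====

-- B on a run of non-shot chars with a nonempty accumulator: one final flush
theorem pvAltGo_flush (ps : String) : ∀ (suffix : List Char),
    (∀ c ∈ suffix, ps.toList.contains c = false) →
    ∀ (cur : List Char) (acc : List String), cur ≠ [] →
    pvAltGo ps suffix cur acc = acc ++ [String.mk (cur ++ suffix)] := by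
  intro suffix
  induction suffix with
  | nil => intro _ cur acc hcur; simp [pvAltGo, hcur]
  | cons c rest ih =>
    intro hall cur acc hcur
    have hc : ps.toList.contains c = false := hall c (by simp)
    simp only [pvAltGo, hc, Bool.false_eq_true, ite_false]
    rw [ih (fun x hx => hall x (by simp [hx])) (cur ++ [c]) acc (by simp)]
    simp

-- B on a run of non-shot chars starting with an empty accumulator
theorem pvAltGo_nil (ps : String) : ∀ (suffix : List Char),
    (∀ c ∈ suffix, ps.toList.contains c = false) →
    ∀ (acc : List String),
    pvAltGo ps suffix [] acc = if suffix = [] then acc else acc ++ [String.mk suffix] := by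
  intro suffix hall acc
  cases suffix with
  | nil => simp [pvAltGo]
  | cons c rest =>
    have hc : ps.toList.contains c = false := hall c (by simp)
    simp only [pvAltGo, hc, Bool.false_eq_true, ite_false, List.nil_append]
    rw [pvAltGo_flush ps rest (fun x hx => hall x (by simp [hx])) [c] acc (by simp)]
    simp

-- KEY: a trailing token (shot char + non-shot run) splits off B's output on the right
theorem pvAltGo_split (ps : String) (d : Char) (suffix : List Char)
    (hd : ps.toList.contains d = true)
    (hsuf : ∀ c ∈ suffix, ps.toList.contains c = false) :
    ∀ (xs cur : List Char) (acc : List String),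
    pvAltGo ps (xs ++ d :: suffix) cur acc = pvAltGo ps xs cur acc ++ [String.mk (d :: suffix)] := by
  intro xs
  induction xs with
  | nil =>
    intro cur acc
    simp only [List.nil_append, pvAltGo, hd, ite_true]
    rw [pvAltGo_flush ps suffix hsuf [d] _ (by simp)]
    simp
  | cons c rest ih =>
    intro cur acc
    simp only [List.cons_append, pvAltGo]
    split
    · rw [ih]
    · rw [ih]

-- A's inner loop splits off the maximal non-shot prefix (of the reversed list)
theorem pvInnerA_spec (ps : String) : ∀ (rcs cur : List Char),
    ∃ a b, rcs = a ++ b ∧ pvInnerA ps rcs cur = (b, a.reverse ++ cur) ∧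
      (∀ c ∈ a, ps.toList.contains c = false) ∧
      (∀ d rest', b = d :: rest' → ps.toList.contains d = true) := by
  intro rcs
  induction rcs with
  | nil =>
    intro cur
    exact ⟨[], [], by simp, by simp [pvInnerA], by simp, by intro _ _ h; simp at h⟩
  | cons c rest ih =>
    intro cur
    by_cases hc : ps.toList.contains c = true
    · exact ⟨[], c :: rest, by simp, by unfold pvInnerA; rw [if_pos hc]; simp, by simp,
        by intro d rest' h; cases h; exact hc⟩
    · obtain ⟨a, b, heq, hinner, ha, hb⟩ := ih (c :: cur)
      refine ⟨c :: a, b, by simp [heq], ?_, ?_, hb⟩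
      · simp only [pvInnerA, hc, Bool.false_eq_true, ite_false, hinner, List.reverse_cons,
          List.append_assoc]
        simp
      · intro x hx
        rcases List.mem_cons.mp hx with h | h
        · subst h; simpa using hc
        · exact ha x h

-- Main: A's backward loop equals B's forward scan (with accumulated shots appended)
theorem pvOuter_eq (ps : String) : ∀ (n : ℕ) (rcs : List Char), rcs.length ≤ n →
    ∀ (shots : List String),
    pvOuterA ps rcs shots = pvAltGo ps rcs.reverse [] [] ++ shots := by
  intro n
  induction n with
  | zero =>
    intro rcs hlen shots
    have : rcs = [] := List.eq_nil_of_length_eq_zero (Nat.le_zero.mp hlen)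
    subst this
    simp [pvOuterA, pvAltGo]
  | succ n ih =>
    intro rcs hlen shots
    cases rcs with
    | nil => simp [pvOuterA, pvAltGo]
    | cons c rest =>
      obtain ⟨a, b, heq, hinner, ha, hb⟩ := pvInnerA_spec ps (c :: rest) []
      rw [pvOuterA]
      cases b with
      | nil =>
        have hane : a ≠ [] := by
          intro h; rw [h] at heq; simp at heq
        rw [hinner]
        simp only [pvOuterA]
        have hrev : (c :: rest).reverse = a.reverse := by rw [heq]; simp
        rw [hrev, pvAltGo_nil ps a.reverse (by intro x hx; exact ha x (by simpa using hx))]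
        simp [hane]
      | cons d rest' =>
        have hd : ps.toList.contains d = true := hb d rest' rfl
        rw [hinner]
        simp only [hd, dite_true]
        have hlen' : rest'.length ≤ n := by
          have : (c :: rest).length = a.length + (rest'.length + 1) := by
            rw [heq]; simp
          simp at this hlen
          omega
        rw [ih rest' hlen']
        have hrev : (c :: rest).reverse = rest'.reverse ++ d :: a.reverse := by
          rw [heq]; simp
        rw [hrev, pvAltGo_split ps d a.reverse hd
          (by intro x hx; exact ha x (by simpa using hx)) rest'.reverse [] []]
        simp

-- ===== VERDICT (by name: the statement is the Claim_ definition above) =====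
theorem parse_individual_point_spec : Claim_equal_parse_individual_point := by
  intro raw ps _
  unfold Spec_parse_individual_point parse_individual_point parse_individual_point_alt
  rw [pvOuter_eq ps raw.toList.reverse.length raw.toList.reverse le_rfl []]
  simp
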